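-- pv_equiv track=rewrite | github.com/goldyv2/rsa-encryption | main.py | find_decryption_exponent
-- ===== SOURCE A (Python) =====
-- from typing import Optional
--
-- def gcd(a: int, b: int) -> int:
--     if a <= 0 or b <= 0:
--         return 0
--
--     largest = max(a, b)
--
--     for num_to_multiply in range(largest, 0, -1):
--
--         # we use modulus division to check if a and b get's divided evenley.
--         if a % num_to_multiply == 0 and b % num_to_multiply == 0:
--             return num_to_multiply
--
--     return 1
--
-- def euler_totient(number: int) -> int:
--     """
--     Calculates how many of the numbers less than or equal to
--     this value are coprime (two numbers have no common divisor except 1).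
--     """
--     coprime_count = 0
--
--     for num_to_check in range(1, number):
--
--         if gcd(num_to_check, number) == 1:
--             coprime_count += 1
--
--     return coprime_count
--
-- def find_decryption_exponent(encryption_exponent: int, rsa_module: int) -> Optional[int]:
--     decryption_exponent = 1
--
--     coprime_numbers_count = euler_totient(rsa_module)
--
--     while decryption_exponent < coprime_numbers_count:
--         # (e x d) mod ϕ(n) = 1
--         if (encryption_exponent * decryption_exponent) % coprime_numbers_count == 1:
--             return decryption_exponent
--
--         decryption_exponent += 1
--
--     # should never really happen if correct input is given.
--     return None
-- ===== SOURCE B (Python) =====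
-- from typing import Optional
--
-- def _gcd(a: int, b: int) -> int:
--     # Euclidean algorithm (O(log) instead of A's descending trial scan)
--     while b:
--         a, b = b, a % b
--     return a
--
-- def find_decryption_exponent(encryption_exponent: int, rsa_module: int) -> Optional[int]:
--     # totient by counting coprimes with the Euclidean gcd
--     phi = 0
--     for k in range(1, rsa_module):
--         if _gcd(k, rsa_module) == 1:
--             phi += 1
--     if phi <= 1:
--         return None
--     # modular inverse by the extended Euclidean algorithm
--     r0, r1 = encryption_exponent % phi, phi
--     x0, x1 = 1, 0
--     while r1:
--         q = r0 // r1
--         r0, r1 = r1, r0 - q * r1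
--         x0, x1 = x1, x0 - q * x1
--     if r0 != 1:
--         return None
--     return x0 % phi
-- ===== Notes on version B (the rewrite author's own statement) =====
-- stated objective: faster
-- what changed: The totient count uses the Euclidean gcd instead of A's descending trial-division scan, and the decryption exponent is computed by the extended Euclidean algorithm (modular inverse) instead of A's linear search over all candidates.
import Mathlib
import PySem

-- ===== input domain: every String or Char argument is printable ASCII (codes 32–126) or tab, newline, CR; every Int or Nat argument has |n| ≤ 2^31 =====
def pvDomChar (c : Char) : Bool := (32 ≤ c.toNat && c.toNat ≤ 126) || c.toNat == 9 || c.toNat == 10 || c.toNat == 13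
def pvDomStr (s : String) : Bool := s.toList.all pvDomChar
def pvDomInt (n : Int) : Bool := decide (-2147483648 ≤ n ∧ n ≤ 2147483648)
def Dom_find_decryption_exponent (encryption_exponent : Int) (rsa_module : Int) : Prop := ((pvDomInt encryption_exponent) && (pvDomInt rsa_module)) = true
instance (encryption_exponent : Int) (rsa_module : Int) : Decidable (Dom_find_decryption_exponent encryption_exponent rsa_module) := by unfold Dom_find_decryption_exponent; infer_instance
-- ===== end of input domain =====

-- B replaces A's descending trial-division gcd by the Euclidean algorithm and A's
-- linear search for the decryption exponent by the extended Euclidean algorithm (faster).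

-- termination fact both B-side loops cite: a floor-mod by a nonzero divisor shrinks in absolute value
theorem pv_mod_natAbs_lt (a b : Int) (hb : b ≠ 0) :
    (PySem.Int.mod a b).natAbs < b.natAbs := by
  rcases lt_or_gt_of_ne hb with h | h
  · have := PySem.Int.mod_neg_bounds a h
    omega
  · have h1 := PySem.Int.mod_nonneg a h
    have h2 := PySem.Int.mod_lt a h
    omega

-- ===== PORT A =====
-- the for-loop of A's gcd: first element of the countdown list dividing both, else 1
def pvGcdScan (a b : Int) : List Int → Int
  | [] => 1
  | n :: rest =>
    if PySem.Int.mod a n = 0 ∧ PySem.Int.mod b n = 0 then n else pvGcdScan a b rest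

def pvGcdA (a b : Int) : Int :=
  if a ≤ 0 ∨ b ≤ 0 then 0
  else pvGcdScan a b (PySem.List.pyRange (max a b) 0 (-1))

def pvEulerTotient (number : Int) : Int :=
  (PySem.List.pyRange 1 number 1).foldl
    (fun coprime_count num_to_check =>
      if pvGcdA num_to_check number = 1 then coprime_count + 1 else coprime_count) 0

-- A's while-loop: decryption_exponent counts up from d while d < phi
def pvFdeLoop (e phi d : Int) : Option Int :=
  if _h : d < phi then
    if PySem.Int.mod (e * d) phi = 1 then some d
    else pvFdeLoop e phi (d + 1)
  else none
termination_by (phi - d).toNat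
decreasing_by omega

def find_decryption_exponent (encryption_exponent : Int) (rsa_module : Int) : Option Int :=
  pvFdeLoop encryption_exponent (pvEulerTotient rsa_module) 1

-- ===== PORT B =====
-- Source B's _gcd: Euclidean algorithm
def pvGcdE (a b : Int) : Int :=
  if _h : b = 0 then a else pvGcdE b (PySem.Int.mod a b)
termination_by b.natAbs
decreasing_by exact pv_mod_natAbs_lt a b _h

-- Source B's extended-Euclid while-loop over the state (r0, r1, x0, x1); returns (r0, x0)
def pvEgcd (r0 r1 x0 x1 : Int) : Int × Int :=
  if _h : r1 = 0 then (r0, x0)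
  else
    let q := PySem.Int.floordiv r0 r1
    pvEgcd r1 (r0 - q * r1) x1 (x0 - q * x1)
termination_by r1.natAbs
decreasing_by
  have := pv_mod_natAbs_lt r0 r1 _h
  have := PySem.Int.floordiv_mul_add_mod r0 r1
  have : r0 - PySem.Int.floordiv r0 r1 * r1 = PySem.Int.mod r0 r1 := by omega
  simpa [q, this]

def find_decryption_exponent_alt (encryption_exponent : Int) (rsa_module : Int) : Option Int :=
  let phi := (PySem.List.pyRange 1 rsa_module 1).foldl
    (fun c k => if pvGcdE k rsa_module = 1 then c + 1 else c) 0
  if phi ≤ 1 then none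
  else
    let p := pvEgcd (PySem.Int.mod encryption_exponent phi) phi 1 0
    if p.1 ≠ 1 then none
    else some (PySem.Int.mod p.2 phi)

-- ===== PRECONDITION & SPEC =====
def Spec_find_decryption_exponent (encryption_exponent : Int) (rsa_module : Int) (out : Option Int) : Prop := out = find_decryption_exponent_alt encryption_exponent rsa_module
instance (encryption_exponent : Int) (rsa_module : Int) (out : Option Int) : Decidable (Spec_find_decryption_exponent encryption_exponent rsa_module out) := by unfold Spec_find_decryption_exponent; infer_instance

-- ===== CLAIM (what is proved, stated in full; the proofs are below) =====
def Claim_equal_find_decryption_exponent : Prop := ∀ (encryption_exponent : Int) (rsa_module : Int), Dom_find_decryption_exponent encryption_exponent rsa_module → Spec_find_decryption_exponent encryption_exponent rsa_module (find_decryption_exponent encryption_exponent rsa_module)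

-- ===== LEMMAS AND PROOFS =====

-- the Euclidean loop computes the gcd (on nonnegative inputs)
theorem pvGcdE_eq (n : Nat) : ∀ b a : Int, b.natAbs = n → 0 ≤ a → 0 ≤ b →
    pvGcdE a b = Int.gcd a b := by
  induction n using Nat.strong_induction_on with
  | _ n ih =>
    intro b a hn ha hb
    rw [pvGcdE]
    split_ifs with h
    · subst h
      simp [Int.gcd, Int.natAbs_of_nonneg ha]
    · have hbpos : 0 < b := lt_of_le_of_ne hb (Ne.symm h)
      have h1 := PySem.Int.mod_nonneg a hbpos
      have h2 := PySem.Int.mod_lt a hbpos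
      rw [ih (PySem.Int.mod a b).natAbs (by omega) _ _ rfl hb h1,
          PySem.Int.mod_eq_emod_of_pos hbpos, Int.gcd_comm, Int.gcd_emod]

-- A's descending scan from any m ≥ gcd a b finds exactly the gcd
theorem pvGcdScan_eq (a b : Int) (ha : 1 ≤ a) (_hb : 1 ≤ b) :
    ∀ n : Nat, ∀ m : Int, m.toNat = n → (Int.gcd a b : Int) ≤ m →
    pvGcdScan a b (PySem.List.pyRange m 0 (-1)) = Int.gcd a b := by
  have hg0 : 0 < (Int.gcd a b : Int) := by
    exact_mod_cast Int.gcd_pos_of_ne_zero_left b (show a ≠ 0 by omega)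
  have hga : (Int.gcd a b : Int) ∣ a := Int.gcd_dvd_left a b
  have hgb : (Int.gcd a b : Int) ∣ b := Int.gcd_dvd_right a b
  intro n
  induction n using Nat.strong_induction_on with
  | _ n ih =>
    intro m hm hgm
    rw [PySem.List.pyRange_neg_one_cons (by omega), pvGcdScan]
    split_ifs with h
    · -- m divides both, hence m ∣ gcd and m ≤ gcd; with gcd ≤ m, m = gcd
      obtain ⟨h1, h2⟩ := h
      have hma : m ∣ a := (PySem.Int.mod_eq_zero_iff_dvd a m).1 h1
      have hmb : m ∣ b := (PySem.Int.mod_eq_zero_iff_dvd b m).1 h2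
      have hmcast : (m.toNat : Int) = m := Int.toNat_of_nonneg (by omega)
      have hdg : m.toNat ∣ a.gcd b := Int.dvd_gcd (hmcast ▸ hma) (hmcast ▸ hmb)
      have hmd : m ∣ (Int.gcd a b : Int) := by rw [← hmcast]; exact_mod_cast hdg
      have := Int.le_of_dvd hg0 hmd
      omega
    · -- m does not divide both, so gcd ≠ m, hence gcd ≤ m - 1
      have hne : (Int.gcd a b : Int) ≠ m := by
        intro hEq
        exact h ⟨by rw [← hEq] at *; exact (PySem.Int.mod_eq_zero_iff_dvd a _).2 hga,
                 by rw [← hEq] at *; exact (PySem.Int.mod_eq_zero_iff_dvd b _).2 hgb⟩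
      exact ih (m - 1).toNat (by omega) (m - 1) rfl (by omega)

-- hence A's gcd agrees with B's Euclidean gcd on positive inputs
theorem pvGcdA_eq_pvGcdE (a b : Int) (ha : 1 ≤ a) (hb : 1 ≤ b) :
    pvGcdA a b = pvGcdE a b := by
  have hga : (Int.gcd a b : Int) ∣ a := Int.gcd_dvd_left a b
  have hle : (Int.gcd a b : Int) ≤ max a b :=
    le_trans (Int.le_of_dvd (by omega) hga) (le_max_left a b)
  rw [pvGcdA, if_neg (by omega), pvGcdScan_eq a b ha hb (max a b).toNat (max a b) rfl hle,
      pvGcdE_eq b.natAbs b a rfl (by omega) (by omega)]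

-- the two totient folds agree
theorem pvPhi_eq (number : Int) :
    pvEulerTotient number =
      (PySem.List.pyRange 1 number 1).foldl
        (fun c k => if pvGcdE k number = 1 then c + 1 else c) 0 := by
  unfold pvEulerTotient
  apply PySem.List.foldl_congr_mem
  intro acc x hx
  have hx' := PySem.List.mem_pyRange_one.1 hx
  rw [pvGcdA_eq_pvGcdE x number hx'.1 (by omega)]

-- extended Euclid: first component is the gcd, and it stays ≡ x·A0 (mod N)
theorem pvEgcd_spec (A0 N : Int) : ∀ (n : Nat) (r1 r0 x0 x1 : Int), r1.natAbs = n →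
    0 ≤ r0 → 0 ≤ r1 → r0 ≡ x0 * A0 [ZMOD N] → r1 ≡ x1 * A0 [ZMOD N] →
    (pvEgcd r0 r1 x0 x1).1 = Int.gcd r0 r1 ∧
    (pvEgcd r0 r1 x0 x1).1 ≡ (pvEgcd r0 r1 x0 x1).2 * A0 [ZMOD N] := by
  intro n
  induction n using Nat.strong_induction_on with
  | _ n ih =>
    intro r1 r0 x0 x1 hn h0 h1 hc0 hc1
    rw [pvEgcd]
    split_ifs with h
    · subst h
      refine ⟨?_, hc0⟩
      simp [Int.gcd, Int.natAbs_of_nonneg h0]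
    · have hpos : 0 < r1 := lt_of_le_of_ne h1 (Ne.symm h)
      have hmod : r0 - PySem.Int.floordiv r0 r1 * r1 = PySem.Int.mod r0 r1 := by
        have := PySem.Int.floordiv_mul_add_mod r0 r1; omega
      have hm1 := PySem.Int.mod_nonneg r0 hpos
      have hm2 := PySem.Int.mod_lt r0 hpos
      have hcnew : r0 - PySem.Int.floordiv r0 r1 * r1 ≡
          (x0 - PySem.Int.floordiv r0 r1 * x1) * A0 [ZMOD N] := by
        have := hc0.sub (hc1.mul_left (PySem.Int.floordiv r0 r1))
        calc r0 - PySem.Int.floordiv r0 r1 * r1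
            ≡ x0 * A0 - PySem.Int.floordiv r0 r1 * (x1 * A0) [ZMOD N] := this
          _ = (x0 - PySem.Int.floordiv r0 r1 * x1) * A0 := by ring
      obtain ⟨hg, hx⟩ := ih (r0 - PySem.Int.floordiv r0 r1 * r1).natAbs
        (by rw [hmod]; have := pv_mod_natAbs_lt r0 r1 h; omega)
        _ r1 x1 _ rfl h1 (by omega) hc1 hcnew
      refine ⟨?_, hx⟩
      rw [hg, hmod, PySem.Int.mod_eq_emod_of_pos hpos, Int.gcd_comm, Int.gcd_emod]

-- A's search loop returns none when no candidate satisfies the congruence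
theorem pvFdeLoop_none (e phi : Int) (hno : ∀ j : Int, PySem.Int.mod (e * j) phi ≠ 1) :
    ∀ (n : Nat) (d : Int), (phi - d).toNat = n → pvFdeLoop e phi d = none := by
  intro n
  induction n using Nat.strong_induction_on with
  | _ n ih =>
    intro d hn
    rw [pvFdeLoop]
    split_ifs with h1 h2
    · exact absurd h2 (hno d)
    · exact ih (phi - (d + 1)).toNat (by omega) (d + 1) rfl
    · rfl

-- A's search loop finds the unique solution inv when started at any d ≤ inv
theorem pvFdeLoop_finds (e phi inv : Int) (hinv : inv < phi)
    (hsat : PySem.Int.mod (e * inv) phi = 1)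
    (huniq : ∀ j : Int, 1 ≤ j → j < phi → PySem.Int.mod (e * j) phi = 1 → j = inv) :
    ∀ (n : Nat) (d : Int), (inv - d).toNat = n → 1 ≤ d → d ≤ inv → pvFdeLoop e phi d = some inv := by
  intro n
  induction n using Nat.strong_induction_on with
  | _ n ih =>
    intro d hn hd1 hd
    rw [pvFdeLoop]
    rw [dif_pos (by omega)]
    split_ifs with h2
    · rw [huniq d hd1 (by omega) h2]
    · have hne : d ≠ inv := by intro hEq; exact h2 (hEq ▸ hsat)
      exact ih (inv - (d + 1)).toNat (by omega) (d + 1) rfl (by omega) (by omega)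

-- modular facts used in the main proof
theorem pv_mod_one_of_modEq (e j phi : Int) (hphi : 2 ≤ phi) (h : e * j ≡ 1 [ZMOD phi]) :
    PySem.Int.mod (e * j) phi = 1 := by
  rw [PySem.Int.mod_eq_emod_of_pos (by omega)]
  have h' : e * j % phi = 1 % phi := h
  have h1 : (1 : Int) % phi = 1 := Int.emod_eq_of_lt (by omega) (by omega)
  rw [h1] at h'
  exact h' 

theorem pv_modEq_of_mod_one (e j phi : Int) (hphi : 2 ≤ phi)
    (h : PySem.Int.mod (e * j) phi = 1) : e * j ≡ 1 [ZMOD phi] := by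
  rw [PySem.Int.mod_eq_emod_of_pos (by omega)] at h
  show _ % _ = _ % _
  rw [h, Int.emod_eq_of_lt (by omega) (by omega)]

-- ===== VERDICT (by name: the statement is the Claim_ definition above) =====
theorem find_decryption_exponent_spec : Claim_equal_find_decryption_exponent := by
  intro e rsa _dom
  unfold Spec_find_decryption_exponent find_decryption_exponent find_decryption_exponent_alt
  rw [← pvPhi_eq]
  set phi := pvEulerTotient rsa with hphidef
  by_cases hphi : phi ≤ 1
  · rw [if_pos hphi, pvFdeLoop]
    rw [dif_neg (by omega)]
  · rw [if_neg hphi]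
    have hphi2 : 2 ≤ phi := by omega
    -- set up the extended-Euclid run
    have hA0 : 0 ≤ PySem.Int.mod e phi := PySem.Int.mod_nonneg e (by omega)
    have hcong0 : PySem.Int.mod e phi ≡ 1 * PySem.Int.mod e phi [ZMOD phi] := by
      rw [one_mul]
    have hcong1 : phi ≡ 0 * PySem.Int.mod e phi [ZMOD phi] := by
      rw [zero_mul]; exact Int.modEq_zero_iff_dvd.2 dvd_rfl
    obtain ⟨hg, hx⟩ := pvEgcd_spec (PySem.Int.mod e phi) phi phi.natAbs phi
      (PySem.Int.mod e phi) 1 0 rfl hA0 (by omega) hcong0 hcong1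
    set p := pvEgcd (PySem.Int.mod e phi) phi 1 0 with hpdef
    -- the gcd computed is gcd(e, phi)
    have hgcd : p.1 = (Int.gcd e phi : Int) := by
      rw [hg, PySem.Int.mod_eq_emod_of_pos (show (0:Int) < phi by omega), Int.gcd_emod]
    -- the modular-inverse congruence: p.1 ≡ p.2 * e (mod phi)
    have hmodE : PySem.Int.mod e phi ≡ e [ZMOD phi] := by
      show _ % _ = _ % _
      rw [PySem.Int.mod_eq_emod_of_pos (show (0:Int) < phi by omega), Int.emod_emod]
    have hxe : p.1 ≡ p.2 * e [ZMOD phi] := hx.trans (hmodE.mul_left p.2)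
    by_cases hone : p.1 = 1
    · -- gcd = 1: B returns the inverse, A's scan finds exactly it
      rw [if_neg (by simp [hone])]
      set inv := PySem.Int.mod p.2 phi with hinvdef
      have hinv0 : 0 ≤ inv := PySem.Int.mod_nonneg p.2 (by omega)
      have hinvlt : inv < phi := PySem.Int.mod_lt p.2 (by omega)
      have hinvcong : p.2 ≡ inv [ZMOD phi] := by
        show _ % _ = _ % _
        rw [hinvdef, PySem.Int.mod_eq_emod_of_pos (show (0:Int) < phi by omega), Int.emod_emod]
      have hEinv : e * inv ≡ 1 [ZMOD phi] := by
        have : p.2 * e ≡ 1 [ZMOD phi] := (hone ▸ hxe).symm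
        calc e * inv ≡ e * p.2 [ZMOD phi] := (hinvcong.symm).mul_left e
          _ = p.2 * e := by ring
          _ ≡ 1 [ZMOD phi] := this
      have hsat : PySem.Int.mod (e * inv) phi = 1 :=
        pv_mod_one_of_modEq e inv phi hphi2 hEinv
      have huniq : ∀ j : Int, 1 ≤ j → j < phi → PySem.Int.mod (e * j) phi = 1 → j = inv := by
        intro j hj1 hjlt hj
        have hEj : e * j ≡ 1 [ZMOD phi] := pv_modEq_of_mod_one e j phi hphi2 hj
        have : j ≡ inv [ZMOD phi] := by
          calc j ≡ j * (e * inv) [ZMOD phi] := by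
                have := hEinv.mul_left j
                simpa using this.symm
            _ = (e * j) * inv := by ring
            _ ≡ 1 * inv [ZMOD phi] := hEj.mul_right inv
            _ = inv := by ring
        have hd : phi ∣ inv - j := this.dvd
        have : inv - j = 0 := Int.eq_zero_of_abs_lt_dvd hd (by rw [abs_lt]; omega)
        omega
      have hinvne : inv ≠ 0 := by
        intro h0
        have hd : phi ∣ (1 : Int) := by
          have hdd := hEinv.dvd
          rw [h0, mul_zero, sub_zero] at hdd
          exact hdd
        have := Int.le_of_dvd one_pos hd
        omega
      exact pvFdeLoop_finds e phi inv hinvlt hsat huniq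
        (inv - 1).toNat 1 rfl (by omega) (by omega)
    · -- gcd ≠ 1: no solution exists, both sides give none
      rw [if_pos (by simpa using hone)]
      apply pvFdeLoop_none e phi _ (phi - 1).toNat 1 rfl
      intro j hj
      have hEj : e * j ≡ 1 [ZMOD phi] := pv_modEq_of_mod_one e j phi hphi2 hj
      have hgdvd : p.1 ∣ 1 := by
        have h1 : p.1 ∣ e := hgcd ▸ Int.gcd_dvd_left e phi
        have h2 : p.1 ∣ phi := hgcd ▸ Int.gcd_dvd_right e phi
        have h3 : phi ∣ 1 - e * j := hEj.dvd
        have : p.1 ∣ 1 - e * j := dvd_trans h2 h3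
        have h4 : p.1 ∣ e * j := Dvd.dvd.mul_right h1 j
        have := dvd_add this h4
        simpa using this
      have hg0 : 0 ≤ p.1 := by rw [hgcd]; exact_mod_cast Nat.zero_le _
      exact hone (Int.eq_one_of_dvd_one hg0 hgdvd)
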